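-- pv_equiv track=rewrite | github.com/deewdelhi/InternshipProblems | UMT.py | split_array_equal_average
-- ===== SOURCE A (Python) =====
-- def split_array_equal_average(array):
--     # Special case: if the length of the array is 1, we can't split it into two non-empty lists
--     if len(array) == 1:
--         return False
--
--     total_sum = sum(array)
--     len_array = len(array)
--
--     # Create a set to store all possible sums that can be made using the first i elements
--     # of the array to form a sublist of size j
--     list_with_sums = [set() for j in range(len_array // 2 + 1)]
--     list_with_sums[0].add(0)
--
--     # Loop through each element of the array and update the list_with_sums set for each possible sublist size
--     for number in array:
--         for i in range(len_array // 2, 0, -1):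
--             for j in list_with_sums[i - 1]:
--                 list_with_sums[i].add(j + number)
--
--     # Loop through each possible sublist size and check if there is a sum that can form
--     # a sublist of that size with an average equal to the overall average
--     for i in range(1, len_array // 2 + 1):
--         if total_sum * i % len_array == 0 and total_sum * i // len_array in list_with_sums[i]:
--             return True
--
--     return False
-- ===== SOURCE B (Python) =====
-- def split_array_equal_average(array):
--     total = sum(array)
--     n = len(array)
--
--     def can(rest, k, target):
--         # is there a k-element subset of rest summing to target?
--         if k == 0:
--             return target == 0
--         if len(rest) < k:
--             return False
--         return can(rest[1:], k - 1, target - rest[0]) or can(rest[1:], k, target)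
--
--     for k in range(1, n // 2 + 1):
--         if total * k % n == 0 and can(array, k, total * k // n):
--             return True
--     return False
-- ===== Notes on version B (the rewrite author's own statement) =====
-- stated objective: alternative
-- what changed: Replaces A's size-indexed reachable-sum DP (a list of sets updated in reverse size order per element) with a direct recursive search for a k-element subset summing to total*k//n, tried for each feasible size k.
import Mathlib
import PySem

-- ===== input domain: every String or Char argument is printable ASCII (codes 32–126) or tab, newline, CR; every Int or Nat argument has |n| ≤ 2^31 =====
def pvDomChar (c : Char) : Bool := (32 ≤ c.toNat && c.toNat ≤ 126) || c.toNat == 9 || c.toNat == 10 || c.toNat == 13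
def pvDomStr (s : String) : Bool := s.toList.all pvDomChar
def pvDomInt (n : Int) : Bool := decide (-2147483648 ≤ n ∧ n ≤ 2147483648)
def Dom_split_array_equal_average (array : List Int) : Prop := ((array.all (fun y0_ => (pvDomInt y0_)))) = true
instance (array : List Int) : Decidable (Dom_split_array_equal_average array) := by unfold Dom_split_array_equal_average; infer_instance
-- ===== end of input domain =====

-- B replaces A's size-indexed reachable-sum DP table with a direct recursive search
-- for a k-element subset with the target sum (objective: alternative, not faster).

-- ===== PORT A =====
-- A-side helpers: the body of 'for i in range(len_array//2, 0, -1): for j in list_with_sums[i-1]: list_with_sums[i].add(j+number)'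
def pvInner (number : Int) (L : List (PySem.Set Int)) (i : Int) : List (PySem.Set Int) :=
  L.set i.toNat
    ((L.getD (i - 1).toNat PySem.Set.empty).foldl
      (fun s j => PySem.Set.add s (j + number)) (L.getD i.toNat PySem.Set.empty))

-- one iteration of 'for number in array'
def pvStep (half : Int) (L : List (PySem.Set Int)) (number : Int) : List (PySem.Set Int) :=
  (PySem.List.pyRange half 0 (-1)).foldl (pvInner number) L

-- '[set() for j in range(len_array//2+1)]' followed by 'list_with_sums[0].add(0)'
def pvInit (half : Nat) : List (PySem.Set Int) :=
  let l := (List.range (half + 1)).map (fun _ => (PySem.Set.empty : PySem.Set Int))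
  l.set 0 (PySem.Set.add (l.getD 0 PySem.Set.empty) 0)

def split_array_equal_average (array : List Int) : Bool :=
  if array.length == 1 then false
  else
    let total_sum := array.sum
    let len_array : Int := array.length
    let half := PySem.Int.floordiv len_array 2
    let lws := array.foldl (pvStep half) (pvInit half.toNat)
    (PySem.List.pyRange 1 (half + 1) 1).any (fun i =>
      PySem.Int.mod (total_sum * i) len_array == 0 &&
      PySem.Set.contains (lws.getD i.toNat PySem.Set.empty)
        (PySem.Int.floordiv (total_sum * i) len_array))

-- ===== PORT B =====
-- 'can(rest, k, target)': is there a k-element subset of rest summing to target?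
def canAlt : List Int → Nat → Int → Bool
  | _, 0, target => target == 0
  | [], _ + 1, _ => false
  | x :: r, k + 1, target =>
      if r.length + 1 < k + 1 then false
      else canAlt r k (target - x) || canAlt r (k + 1) target

def split_array_equal_average_alt (array : List Int) : Bool :=
  let total := array.sum
  let n : Int := array.length
  (PySem.List.pyRange 1 (PySem.Int.floordiv n 2 + 1) 1).any (fun k =>
    PySem.Int.mod (total * k) n == 0 &&
    canAlt array k.toNat (PySem.Int.floordiv (total * k) n))

-- ===== PRECONDITION & SPEC =====
def Spec_split_array_equal_average (array : List Int) (out : Bool) : Prop := out = split_array_equal_average_alt array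
instance (array : List Int) (out : Bool) : Decidable (Spec_split_array_equal_average array out) := by unfold Spec_split_array_equal_average; infer_instance

-- ===== CLAIM (what is proved, stated in full; the proofs are below) =====
def Claim_equal_split_array_equal_average : Prop := ∀ (array : List Int), Dom_split_array_equal_average array → Spec_split_array_equal_average array (split_array_equal_average array)

-- ===== LEMMAS AND PROOFS =====

-- 'there is a k-element subset of l summing to t' (both ports are characterised by this)
def SS (l : List Int) (k : Nat) (t : Int) : Prop :=
  ∃ u : List Int, u.Sublist l ∧ u.length = k ∧ u.sum = t

lemma ss_zero (l : List Int) (t : Int) : SS l 0 t ↔ t = 0 := by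
  constructor
  · rintro ⟨u, _, hl, hs⟩
    rw [List.length_eq_zero_iff] at hl; subst hl; simpa using hs.symm
  · rintro rfl; exact ⟨[], List.nil_sublist l, rfl, rfl⟩

lemma ss_len_lt {l : List Int} {k : Nat} {t : Int} (h : l.length < k) : ¬ SS l k t := by
  rintro ⟨u, hsub, hl, -⟩
  have := hsub.length_le
  omega

lemma ss_cons (x : Int) (r : List Int) (k : Nat) (t : Int) :
    SS (x :: r) (k + 1) t ↔ SS r k (t - x) ∨ SS r (k + 1) t := by
  constructor
  · rintro ⟨u, hsub, hl, hs⟩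
    rcases List.sublist_cons_iff.mp hsub with h | ⟨v, rfl, hv⟩
    · exact Or.inr ⟨u, h, hl, hs⟩
    · refine Or.inl ⟨v, hv, by simpa using hl, ?_⟩
      simp at hs; omega
  · rintro (⟨u, hsub, hl, hs⟩ | ⟨u, hsub, hl, hs⟩)
    · exact ⟨x :: u, List.cons_sublist_cons.mpr hsub, by simp [hl], by simp [hs]⟩
    · exact ⟨u, hsub.cons x, hl, hs⟩

lemma ss_append_singleton (p : List Int) (x : Int) (k : Nat) (t : Int) :
    SS (p ++ [x]) k t ↔ SS p k t ∨ ∃ k', k = k' + 1 ∧ SS p k' (t - x) := by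
  constructor
  · rintro ⟨u, hsub, hl, hs⟩
    rcases List.sublist_append_iff.mp hsub with ⟨l₁, l₂, rfl, h1, h2⟩
    rcases List.sublist_singleton.mp h2 with rfl | rfl
    · exact Or.inl ⟨l₁, h1, by simpa using hl, by simpa using hs⟩
    · refine Or.inr ⟨l₁.length, by simp at hl; omega, ⟨l₁, h1, rfl, ?_⟩⟩
      simp at hs; omega
  · rintro (⟨u, hsub, hl, hs⟩ | ⟨k', rfl, u, hsub, hl, hs⟩)
    · exact ⟨u, hsub.trans (List.sublist_append_left p [x]), hl, hs⟩
    · exact ⟨u ++ [x], hsub.append (List.Sublist.refl [x]), by simp [hl], by simp [hs]⟩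

lemma canAlt_iff (l : List Int) (k : Nat) (t : Int) : canAlt l k t = true ↔ SS l k t := by
  induction l generalizing k t with
  | nil =>
    cases k with
    | zero => simp [canAlt, ss_zero]
    | succ k => simpa [canAlt] using ss_len_lt (l := []) (t := t) (by simp)
  | cons x r ih =>
    cases k with
    | zero => simp [canAlt, ss_zero]
    | succ k =>
      by_cases hlen : r.length + 1 < k + 1
      · simp only [canAlt, if_pos hlen, Bool.false_eq_true, false_iff]
        exact ss_len_lt (by simpa using hlen)
      · simp only [canAlt, if_neg hlen, Bool.or_eq_true, ih, ss_cons]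

-- length of the state is invariant under A's inner loop
lemma pvStep_length (half : Int) (number : Int) (L : List (PySem.Set Int)) :
    (pvStep half L number).length = L.length := by
  unfold pvStep
  generalize PySem.List.pyRange half 0 (-1) = is
  induction is generalizing L with
  | nil => rfl
  | cons i is ih =>
    rw [List.foldl_cons, ih (pvInner number L i)]
    simp [pvInner]

-- the countdown loop updates each position 1..m from the OLD values (reads at i-1 precede writes there)
lemma pvStep_getD (number : Int) (m : Nat) (L : List (PySem.Set Int)) (hm : m < L.length) (k : Nat) :
    (pvStep (m : Int) L number).getD k PySem.Set.empty =
      if 1 ≤ k ∧ k ≤ m then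
        (L.getD (k - 1) PySem.Set.empty).foldl
          (fun s j => PySem.Set.add s (j + number)) (L.getD k PySem.Set.empty)
      else L.getD k PySem.Set.empty := by
  induction m generalizing L with
  | zero =>
    rw [pvStep, PySem.List.pyRange_neg_one_eq_nil (by norm_num), List.foldl_nil,
      if_neg (by omega)]
  | succ m ih =>
    have hcons : PySem.List.pyRange ((m + 1 : Nat) : Int) 0 (-1) =
        ((m + 1 : Nat) : Int) :: PySem.List.pyRange ((m : Nat) : Int) 0 (-1) := by
      have := PySem.List.pyRange_neg_one_cons (a := ((m + 1 : Nat) : Int)) (b := 0) (by positivity)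
      rw [this]; norm_num
    rw [pvStep, hcons, List.foldl_cons, ← pvStep]
    set L1 := pvInner number L ((m + 1 : Nat) : Int) with hL1
    have hlen1 : L1.length = L.length := by simp [hL1, pvInner, List.length_set]
    have htoNat : (((m + 1 : Nat) : Int)).toNat = m + 1 := by omega
    have htoNat' : ((((m + 1 : Nat) : Int)) - 1).toNat = m := by omega
    have hgetD : ∀ j, j ≠ m + 1 → L1.getD j PySem.Set.empty = L.getD j PySem.Set.empty := by
      intro j hj
      simp only [hL1, pvInner, htoNat, htoNat', List.getD_eq_getElem?_getD, List.getElem?_set]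
      rw [if_neg (by omega)]
    have hgetDm1 : L1.getD (m + 1) PySem.Set.empty =
        (L.getD m PySem.Set.empty).foldl
          (fun s j => PySem.Set.add s (j + number)) (L.getD (m + 1) PySem.Set.empty) := by
      simp only [hL1, pvInner, htoNat, htoNat', List.getD_eq_getElem?_getD, List.getElem?_set]
      simp [hm]
    rw [ih L1 (by omega)]
    by_cases hk : 1 ≤ k ∧ k ≤ m
    · rw [if_pos hk, if_pos (by omega), hgetD k (by omega), hgetD (k - 1) (by omega)]
    · rw [if_neg hk]
      by_cases hk1 : k = m + 1
      · subst hk1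
        rw [if_pos (by omega), hgetDm1, show m + 1 - 1 = m from rfl]
      · rw [if_neg (by omega), hgetD k (by omega)]

lemma pvInit_getD (half k : Nat) :
    (pvInit half).getD k PySem.Set.empty = if k = 0 then [(0 : Int)] else PySem.Set.empty := by
  unfold pvInit
  simp only [List.getD_eq_getElem?_getD, List.getElem?_set]
  by_cases hk : k = 0
  · subst hk
    rw [if_pos rfl, if_pos (by simp)]
    have h0 : (List.map (fun _ => (PySem.Set.empty : PySem.Set Int)) (List.range (half + 1)))[0]? =
        some PySem.Set.empty := by simp
    rw [h0]
    rfl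
  · rw [if_neg (by omega), if_neg hk]
    cases hh : (List.map (fun _ => (PySem.Set.empty : PySem.Set Int)) (List.range (half + 1)))[k]? with
    | none => rfl
    | some s =>
      have hs : s ∈ List.map (fun _ => (PySem.Set.empty : PySem.Set Int)) (List.range (half + 1)) :=
        List.mem_of_getElem? hh
      rcases List.mem_map.mp hs with ⟨-, -, rfl⟩
      rfl

lemma dp_length (half : Int) (p : List Int) :
    (p.foldl (pvStep half) (pvInit half.toNat)).length = half.toNat + 1 := by
  induction p using List.reverseRecOn with
  | nil => simp [pvInit]
  | append_singleton p x ih => rw [List.foldl_append, List.foldl_cons, List.foldl_nil, pvStep_length, ih]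

lemma dp_mem (H : Nat) (p : List Int) : ∀ (k : Nat), k ≤ H → ∀ (t : Int),
    (t ∈ (p.foldl (pvStep (H : Int)) (pvInit H)).getD k PySem.Set.empty ↔ SS p k t) := by
  induction p using List.reverseRecOn with
  | nil =>
    intro k hk t
    rw [List.foldl_nil, pvInit_getD]
    by_cases hk0 : k = 0
    · subst hk0; simp [ss_zero]
    · rw [if_neg hk0]
      simp only [PySem.Set.empty, List.not_mem_nil, false_iff]
      rintro ⟨u, hsub, hl, -⟩
      rcases List.sublist_nil.mp hsub with rfl
      simp at hl; omega
  | append_singleton p x ih =>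
    intro k hk t
    rw [List.foldl_append, List.foldl_cons, List.foldl_nil]
    have hlen : H < (p.foldl (pvStep (H : Int)) (pvInit H)).length := by
      have := dp_length (H : Int) p
      simp only [Int.toNat_natCast] at this
      omega
    rw [pvStep_getD x H (p.foldl (pvStep (H : Int)) (pvInit H)) hlen k]
    by_cases h1 : 1 ≤ k ∧ k ≤ H
    · rw [if_pos h1, PySem.Set.mem_foldl_add _ (fun j => j + x), ih k hk t, ss_append_singleton]
      constructor
      · rintro (h | ⟨j, hj, rfl⟩)
        · exact Or.inl h
        · refine Or.inr ⟨k - 1, by omega, ?_⟩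
          rw [ih (k - 1) (by omega) j] at hj
          simpa using hj
      · rintro (h | ⟨k', hk', hss⟩)
        · exact Or.inl h
        · refine Or.inr ⟨t - x, ?_, by ring⟩
          rw [ih (k - 1) (by omega) (t - x)]
          have : k - 1 = k' := by omega
          rwa [this]
    · rw [if_neg h1, ih k hk t, ss_append_singleton]
      have hk0 : k = 0 := by omega
      subst hk0
      constructor
      · exact Or.inl
      · rintro (h | ⟨k', hk', -⟩)
        · exact h
        · omega

-- ===== VERDICT (by name: the statement is the Claim_ definition above) =====
theorem split_array_equal_average_spec : Claim_equal_split_array_equal_average := by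
  intro array _
  unfold Spec_split_array_equal_average
  simp only [split_array_equal_average, split_array_equal_average_alt]
  by_cases h1 : array.length = 1
  · rw [if_pos (by simpa using h1)]
    have hl : (array.length : Int) = 1 := by exact_mod_cast h1
    rw [hl, show PySem.Int.floordiv (1 : Int) 2 = 0 from by decide,
      PySem.List.pyRange_one_eq_nil (by norm_num)]
    rfl
  · rw [if_neg (by simpa using h1)]
    have hfd : PySem.Int.floordiv ((array.length : Nat) : Int) 2 = ((array.length / 2 : Nat) : Int) :=
      PySem.Int.floordiv_natCast _ 2
    apply Eq.symm
    apply PySem.List.any_congr_mem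
    intro i hi
    rw [hfd, PySem.List.mem_pyRange_one] at hi
    congr 1
    rw [Bool.eq_iff_iff, PySem.Set.contains_iff, canAlt_iff, hfd]
    have hcast : ((i.toNat : Nat) : Int) = i := by omega
    have hmem := dp_mem (array.length / 2) array i.toNat (by omega) 
      (PySem.Int.floordiv (array.sum * i) (array.length : Int))
    simp only [Int.toNat_natCast] at hmem ⊢
    rw [← hmem]
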